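-- pv_equiv track=rewrite | github.com/gollum18/blackjack-agent | bqa/bqa/player.py | get_unknown_cards
-- ===== SOURCE A (Python) =====
-- from collections import Counter
--
-- def get_unknown_cards(known_cards):
--     unknown_cards = []
--     known_counts = Counter(known_cards)
--     for i in range(1, 14):
--         if i in known_counts:
--             count = known_counts[i]
--             for _ in range(4 - count):
--                 unknown_cards.append(i)
--         else:
--             for _ in range(4):
--                 unknown_cards.append(i)
--     return unknown_cards
-- ===== SOURCE B (Python) =====
-- from collections import Counter
--
-- def get_unknown_cards(known_cards):
--     counts = Counter(known_cards)
--     remaining = []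
--     for card in [i for i in range(1, 14) for _ in range(4)]:
--         if counts[card] > 0:
--             counts[card] -= 1
--         else:
--             remaining.append(card)
--     return remaining
-- ===== Notes on version B (the rewrite author's own statement) =====
-- stated objective: alternative
-- what changed: B builds the full 52-card sorted deck and subtractively drains known cards from a Counter while scanning it, instead of A's additive per-rank loop that appends 4-count copies of each rank.
import Mathlib
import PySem

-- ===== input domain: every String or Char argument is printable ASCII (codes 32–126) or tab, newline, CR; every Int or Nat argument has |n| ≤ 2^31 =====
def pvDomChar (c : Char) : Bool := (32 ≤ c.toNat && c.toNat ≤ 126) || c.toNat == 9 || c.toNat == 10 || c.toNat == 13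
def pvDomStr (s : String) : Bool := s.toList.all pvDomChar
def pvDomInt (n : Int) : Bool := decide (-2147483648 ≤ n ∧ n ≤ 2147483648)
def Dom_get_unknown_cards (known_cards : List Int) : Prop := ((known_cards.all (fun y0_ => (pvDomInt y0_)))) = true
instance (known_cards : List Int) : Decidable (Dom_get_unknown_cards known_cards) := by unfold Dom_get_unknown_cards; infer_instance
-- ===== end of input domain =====

-- B removes known cards from a full sorted deck (subtractive drain) instead of A's additive
-- per-rank append of the missing copies; same cost, different decomposition.


-- ===== PORT A =====
def get_unknown_cards (known_cards : List Int) : List Int :=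
  let known_counts := PySem.Dict.counter known_cards
  (PySem.List.pyRange 1 14 1).foldl (fun unknown_cards i =>
    if known_counts.contains i then
      let count := known_counts.getD i 0
      (PySem.List.pyRange 0 (4 - count) 1).foldl (fun acc _ => acc ++ [i]) unknown_cards
    else
      (PySem.List.pyRange 0 4 1).foldl (fun acc _ => acc ++ [i]) unknown_cards) []

-- ===== PORT B =====
def get_unknown_cards_alt (known_cards : List Int) : List Int :=
  let counts := PySem.Dict.counter known_cards
  let full_deck := (PySem.List.pyRange 1 14 1).flatMap (fun i => (PySem.List.pyRange 0 4 1).map (fun _ => i))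
  (full_deck.foldl (fun (st : PySem.Dict Int Int × List Int) card =>
      if st.1.getD card 0 > 0 then (st.1.modify card 0 (· - 1), st.2)
      else (st.1, st.2 ++ [card])) (counts, [])).2

-- ===== PRECONDITION & SPEC =====
def Spec_get_unknown_cards (known_cards : List Int) (out : List Int) : Prop := out = get_unknown_cards_alt known_cards
instance (known_cards : List Int) (out : List Int) : Decidable (Spec_get_unknown_cards known_cards out) := by unfold Spec_get_unknown_cards; infer_instance

-- ===== CLAIM (what is proved, stated in full; the proofs are below) =====
def Claim_equal_get_unknown_cards : Prop := ∀ (known_cards : List Int), Dom_get_unknown_cards known_cards → Spec_get_unknown_cards known_cards (get_unknown_cards known_cards)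

-- ===== LEMMAS AND PROOFS =====

-- One drain step of B's loop (definitionally the fold body of get_unknown_cards_alt).
def pvStep (st : PySem.Dict Int Int × List Int) (card : Int) : PySem.Dict Int Int × List Int :=
  if st.1.getD card 0 > 0 then (st.1.modify card 0 (· - 1), st.2)
  else (st.1, st.2 ++ [card])

-- Draining n copies of rank i appends exactly the copies the counter cannot consume,
-- leaves every other key's count unchanged, and keeps i's count nonnegative.
lemma drain_replicate (n : Nat) (i : Int) (d : PySem.Dict Int Int) (out : List Int)
    (h : 0 ≤ d.getD i 0) :
    ∃ d' : PySem.Dict Int Int,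
      (List.replicate n i).foldl pvStep (d, out)
        = (d', out ++ List.replicate (n - (d.getD i 0).toNat) i)
      ∧ (∀ j, j ≠ i → d'.getD j 0 = d.getD j 0) ∧ 0 ≤ d'.getD i 0 := by
  induction n generalizing d out with
  | zero => exact ⟨d, by simp, fun j _ => rfl, h⟩
  | succ n ih =>
    rw [List.replicate_succ, List.foldl_cons]
    by_cases hc : d.getD i 0 > 0
    · have h1 : 0 ≤ (d.modify i 0 (· - 1)).getD i 0 := by
        simp only [PySem.Dict.getD_modify_self]; omega
      obtain ⟨d', heq, hj, hnn⟩ := ih (d.modify i 0 (· - 1)) out h1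
      refine ⟨d', ?_, fun j hji => by
        rw [hj j hji]; exact PySem.Dict.getD_modify_of_ne d 0 _ hji, hnn⟩
      rw [show pvStep (d, out) i = (d.modify i 0 (· - 1), out) by simp [pvStep, hc], heq]
      simp only [PySem.Dict.getD_modify_self]
      congr 3
      omega
    · have h0 : d.getD i 0 = 0 := le_antisymm (by omega) h
      obtain ⟨d', heq, hj, hnn⟩ := ih d (out ++ [i]) h
      refine ⟨d', ?_, hj, hnn⟩
      rw [show pvStep (d, out) i = (d, out ++ [i]) by simp [pvStep, hc], heq, h0]
      simp [List.replicate_succ, List.append_assoc]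

-- Draining 4 copies of each of a list of distinct ranks.
lemma drain_flatMap (rs : List Int) (d : PySem.Dict Int Int) (out : List Int)
    (hnn : ∀ j, 0 ≤ d.getD j 0) (hnd : rs.Nodup) :
    ((rs.flatMap (fun i => List.replicate 4 i)).foldl pvStep (d, out)).2
      = out ++ rs.flatMap (fun i => List.replicate (4 - (d.getD i 0).toNat) i) := by
  induction rs generalizing d out with
  | nil => simp
  | cons i rest ih =>
    rw [List.flatMap_cons, List.foldl_append]
    obtain ⟨d', heq, hj, hnn_i⟩ := drain_replicate 4 i d out (hnn i)
    rw [heq]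
    have hnn' : ∀ j, 0 ≤ d'.getD j 0 := by
      intro j
      by_cases hji : j = i
      · exact hji ▸ hnn_i
      · rw [hj j hji]; exact hnn j
    rw [ih d' _ hnn' hnd.of_cons, List.flatMap_cons, List.append_assoc]
    congr 2
    apply List.flatMap_congr
    intro j hjr
    have hji : j ≠ i := fun hh => (List.nodup_cons.mp hnd).1 (hh ▸ hjr)
    rw [hj j hji]

-- A's per-rank chunk is 4 - count copies of the rank, in both branches of A's if.
lemma portA_flatMap (known_cards : List Int) :
    get_unknown_cards known_cards
      = (PySem.List.pyRange 1 14 1).flatMap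
          (fun i => List.replicate (4 - ((PySem.Dict.counter known_cards).getD i 0).toNat) i) := by
  show (PySem.List.pyRange 1 14 1).foldl
      (fun unknown_cards i =>
        if (PySem.Dict.counter known_cards).contains i then
          (PySem.List.pyRange 0 (4 - (PySem.Dict.counter known_cards).getD i 0) 1).foldl
            (fun acc _ => acc ++ [i]) unknown_cards
        else
          (PySem.List.pyRange 0 4 1).foldl (fun acc _ => acc ++ [i]) unknown_cards) []
    = _
  have hfun : (fun (unknown_cards : List Int) (i : Int) =>
      if (PySem.Dict.counter known_cards).contains i then
        (PySem.List.pyRange 0 (4 - (PySem.Dict.counter known_cards).getD i 0) 1).foldl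
          (fun acc _ => acc ++ [i]) unknown_cards
      else
        (PySem.List.pyRange 0 4 1).foldl (fun acc _ => acc ++ [i]) unknown_cards)
    = (fun unknown_cards i =>
        unknown_cards ++ List.replicate (4 - ((PySem.Dict.counter known_cards).getD i 0).toNat) i) := by
    funext acc i
    have hnn : (0:Int) ≤ (PySem.Dict.counter known_cards).getD i 0 := by
      rw [PySem.Dict.getD_counter]; positivity
    split
    · rw [show (fun (acc : List Int) (_ : Int) => acc ++ [i])
          = (fun (acc : List Int) (x : Int) => acc ++ [(fun (_ : Int) => i) x]) from rfl,
        PySem.List.foldl_append_singleton_eq_map, List.map_const']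
      congr 1
      rw [PySem.List.length_pyRange_one]
      congr 1
      omega
    · rename_i hcon
      have h0 : (PySem.Dict.counter known_cards).getD i 0 = 0 :=
        PySem.Dict.getD_of_not_contains _ _ (by simpa using hcon)
      rw [show (fun (acc : List Int) (_ : Int) => acc ++ [i])
          = (fun (acc : List Int) (x : Int) => acc ++ [(fun (_ : Int) => i) x]) from rfl,
        PySem.List.foldl_append_singleton_eq_map, List.map_const', h0]
      rfl
  rw [hfun, PySem.List.foldl_append_eq_flatMap, List.nil_append]

-- ===== VERDICT (by name: the statement is the Claim_ definition above) =====
theorem get_unknown_cards_spec : Claim_equal_get_unknown_cards := by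
  intro known_cards _
  unfold Spec_get_unknown_cards
  rw [portA_flatMap]
  show _ = (((PySem.List.pyRange 1 14 1).flatMap (fun i => List.replicate 4 i)).foldl
      pvStep (PySem.Dict.counter known_cards, [])).2
  rw [drain_flatMap _ _ _
    (fun j => by rw [PySem.Dict.getD_counter]; positivity)
    (PySem.List.nodup_pyRange_one 1 14), List.nil_append]
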